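-- pv_equiv track=rewrite | github.com/vxhl/DSA-Docs | CodeWithScaler/Week2/(UO)AmazingSubArrays.py | amazingSubArray
-- ===== SOURCE A (Python) =====
-- def amazingSubArray(S):
--     # First let us define our vowels list
--     vowels = ['A','E','I','O','U']
--     result = 0;
--     count = 0;
--     for i in range(len(S)):
--         if S[i] in vowels:
--             count += 1;
--             count -= i;
--             i = 1
--             while(len(S)>i):
--                 count+=1
--                 i+=1
--
--     return count%10003;
-- ===== SOURCE B (Python) =====
-- def amazingSubArray(S):
--     n = len(S)
--     return sum(n - i for i, c in enumerate(S) if c in "AEIOU") % 10003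
-- ===== Notes on version B (the rewrite author's own statement) =====
-- stated objective: faster
-- what changed: Replace A's O(n) inner while loop per vowel (which just re-adds len(S)-1) by a single enumerate pass adding len(S)-i for each uppercase vowel, then one modulo.
import Mathlib
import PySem

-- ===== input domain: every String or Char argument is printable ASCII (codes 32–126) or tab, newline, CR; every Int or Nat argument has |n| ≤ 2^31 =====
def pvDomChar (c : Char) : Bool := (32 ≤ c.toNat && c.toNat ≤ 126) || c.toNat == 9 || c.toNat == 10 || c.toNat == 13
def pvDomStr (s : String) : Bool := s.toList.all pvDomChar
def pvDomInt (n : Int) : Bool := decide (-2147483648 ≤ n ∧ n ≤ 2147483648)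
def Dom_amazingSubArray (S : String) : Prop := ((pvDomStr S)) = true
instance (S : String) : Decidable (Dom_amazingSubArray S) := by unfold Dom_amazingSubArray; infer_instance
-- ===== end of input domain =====

-- B replaces A's per-vowel inner while loop by one enumerate pass adding len(S)-i per vowel (O(n^2) → O(n)).

-- ===== PORT A =====
-- inner 'while len(S) > i: count += 1; i += 1' (fuel = n.toNat bounds the iterations)
def amazingWhileA (n : Int) : Nat → Int → Int → Int
  | 0, _, count => count
  | f+1, i, count => if n > i then amazingWhileA n f (i+1) (count+1) else count

def amazingSubArray (S : String) : Int :=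
  let vowels : List Char := ['A','E','I','O','U']
  let cs := S.toList
  let n : Int := cs.length
  let count := (PySem.List.pyRange 0 n 1).foldl (fun count i =>
      if vowels.contains (PySem.List.pyGetD cs i ' ') then
        amazingWhileA n n.toNat 1 (count + 1 - i)
      else count) 0
  PySem.Int.mod count 10003

-- ===== PORT B =====
def amazingSubArray_alt (S : String) : Int :=
  let cs := S.toList
  let n : Int := cs.length
  PySem.Int.mod
    ((PySem.List.enumerate cs 0).foldl
      (fun acc p => if "AEIOU".toList.contains p.2 then acc + (n - p.1) else acc) 0)
    10003

-- ===== PRECONDITION & SPEC =====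
def Spec_amazingSubArray (S : String) (out : Int) : Prop := out = amazingSubArray_alt S
instance (S : String) (out : Int) : Decidable (Spec_amazingSubArray S out) := by unfold Spec_amazingSubArray; infer_instance

-- ===== CLAIM (what is proved, stated in full; the proofs are below) =====
def Claim_equal_amazingSubArray : Prop := ∀ (S : String), Dom_amazingSubArray S → Spec_amazingSubArray S (amazingSubArray S)

-- ===== LEMMAS AND PROOFS =====

-- The inner while loop adds exactly n - i when it has enough fuel.
lemma amazingWhileA_eq (n : Int) : ∀ (fuel : Nat) (i c : Int), i ≤ n → (n - i).toNat ≤ fuel →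
    amazingWhileA n fuel i c = c + (n - i) := by
  intro fuel
  induction fuel with
  | zero =>
    intro i c h1 h2
    have : n = i := by omega
    simp [amazingWhileA, this]
  | succ f ih =>
    intro i c h1 h2
    by_cases h : n > i
    · simp only [amazingWhileA, if_pos h]
      rw [ih (i+1) (c+1) (by omega) (by omega)]
      ring
    · have : n = i := by omega
      simp [amazingWhileA, h, this]

-- Both loops compute the same count, for any split full = pre ++ cs.
lemma amazing_loop_eq (full : List Char) :
    ∀ (cs pre : List Char), full = pre ++ cs → ∀ (count : Int),
    (PySem.List.pyRange (pre.length : Int) (full.length : Int) 1).foldl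
      (fun count i =>
        if (['A','E','I','O','U'] : List Char).contains (PySem.List.pyGetD full i ' ') then
          amazingWhileA (full.length : Int) ((full.length : Int)).toNat 1 (count + 1 - i)
        else count) count
    = (PySem.List.enumerate cs (pre.length : Int)).foldl
        (fun acc p => if "AEIOU".toList.contains p.2 then acc + ((full.length : Int) - p.1) else acc) count := by
  intro cs
  induction cs with
  | nil =>
    intro pre hfull count
    have hlen : (full.length : Int) = (pre.length : Int) := by
      subst hfull; simp
    rw [hlen, PySem.List.pyRange_one_eq_nil (le_refl _)]
    simp [PySem.List.enumerate]
  | cons c cs ih =>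
    intro pre hfull count
    have hlt : (pre.length : Int) < (full.length : Int) := by
      subst hfull; simp
    rw [PySem.List.pyRange_one_cons hlt, PySem.List.enumerate_cons]
    simp only [List.foldl_cons]
    have hget : PySem.List.pyGetD full (pre.length : Int) ' ' = c := by
      subst hfull
      rw [PySem.List.pyGetD_natCast]
      simp [List.getD]
    rw [hget]
    have hstr : ("AEIOU".toList : List Char) = ['A','E','I','O','U'] := by decide
    have hbody :
        (if (['A','E','I','O','U'] : List Char).contains c then
          amazingWhileA (full.length : Int) ((full.length : Int)).toNat 1 (count + 1 - (pre.length : Int))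
        else count)
        = (if "AEIOU".toList.contains c then count + ((full.length : Int) - (pre.length : Int)) else count) := by
      rw [hstr]
      by_cases hv : (['A','E','I','O','U'] : List Char).contains c
      · rw [if_pos hv, if_pos hv]
        rw [amazingWhileA_eq (full.length : Int) ((full.length : Int)).toNat 1
              (count + 1 - (pre.length : Int)) (by omega) (by omega)]
        ring
      · rw [if_neg hv, if_neg hv]
    rw [hbody]
    have hpre : full = (pre ++ [c]) ++ cs := by rw [hfull]; simp
    have := ih (pre ++ [c]) hpre
      (if "AEIOU".toList.contains c then count + ((full.length : Int) - (pre.length : Int)) else count)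
    simpa using this

-- ===== VERDICT (by name: the statement is the Claim_ definition above) =====
theorem amazingSubArray_spec : Claim_equal_amazingSubArray := by
  intro S _
  simp only [Spec_amazingSubArray, amazingSubArray, amazingSubArray_alt]
  have h := amazing_loop_eq S.toList S.toList [] rfl 0
  simp only [List.length_nil, Nat.cast_zero] at h
  rw [h]
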